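-- pv_equiv track=rewrite | github.com/ditpowuh/convertly | src/files.py | getPossibleExtensions
-- ===== SOURCE A (Python) =====
-- fileTypes = {
--     "group": {
--         "images": {
--             "content": [
--                 "png",
--                 "jpg",
--                 "jpeg",
--                 "webp",
--                 "bmp",
--                 "heic"
--             ],
--             "other": {
--                 "individual": ["gif", "pdf"]
--             }
--         },
--         "videos": {
--             "content": [
--               "mp4",
--               "m4v",
--               "mov",
--               "avi",
--               "wmv",
--               "flv",
--               "webm",
--               "mkv",
--               "3gp",
--               "mpeg",
--               "mpg",
--               "vob"
--             ],
--             "other": {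
--                 "individual": ["gif"],
--                 "group": ["audio"]
--             }
--         },
--         "audio": {
--             "content": [
--               "mp3",
--               "wav",
--               "aac",
--               "ogg",
--               "m4a",
--               "flac",
--               "alac",
--               "wma",
--               "aiff",
--               "amr",
--               "opus"
--             ]
--         },
--         "fonts": {
--             "content": [
--                 "otf",
--                 "ttf",
--                 "woff",
--                 "woff2"
--             ]
--         }
--     },
--     "individual": {
--         "gif": {
--             "group": ["images", "videos"]
--         },
--         "pdf": {
--             "group": ["images"]
--         }
--     }
-- }
--
-- def getPossibleExtensions(inputExtension: str):
--     possibleExtensions = []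
--     if inputExtension in fileTypes["individual"]:
--         if "individual" in fileTypes["individual"][inputExtension]:
--             possibleExtensions = possibleExtensions + fileTypes["individual"][inputExtension]["individual"]
--         if "group" in fileTypes["individual"][inputExtension]:
--             for group in fileTypes["individual"][inputExtension]["group"]:
--                 possibleExtensions = possibleExtensions + fileTypes["group"][group]["content"]
--         return sorted(possibleExtensions)
--     for category in fileTypes["group"].keys():
--         if inputExtension in fileTypes["group"][category]["content"]:
--             possibleExtensions = possibleExtensions + fileTypes["group"][category]["content"]
--             if "other" in fileTypes["group"][category]:
--                 if "individual" in fileTypes["group"][category]["other"]: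
--                     possibleExtensions = possibleExtensions + fileTypes["group"][category]["other"]["individual"]
--                 if "group" in fileTypes["group"][category]["other"]:
--                     for group in fileTypes["group"][category]["other"]["group"]:
--                         possibleExtensions = possibleExtensions + fileTypes["group"][group]["content"]
--             return sorted(possibleExtensions)
--     return sorted(possibleExtensions)
-- ===== SOURCE B (Python) =====
-- fileTypes = {
--     "group": {
--         "images": {
--             "content": ["png", "jpg", "jpeg", "webp", "bmp", "heic"],
--             "other": {"individual": ["gif", "pdf"]}
--         },
--         "videos": {
--             "content": ["mp4", "m4v", "mov", "avi", "wmv", "flv", "webm", "mkv", "3gp", "mpeg", "mpg", "vob"],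
--             "other": {"individual": ["gif"], "group": ["audio"]}
--         },
--         "audio": {
--             "content": ["mp3", "wav", "aac", "ogg", "m4a", "flac", "alac", "wma", "aiff", "amr", "opus"]
--         },
--         "fonts": {
--             "content": ["otf", "ttf", "woff", "woff2"]
--         }
--     },
--     "individual": {
--         "gif": {"group": ["images", "videos"]},
--         "pdf": {"group": ["images"]}
--     }
-- }
--
-- # Precomputed answer table, built once at module load.
-- _resultMap = {}
-- for _ext, _info in fileTypes["individual"].items():
--     _exts = list(_info.get("individual", []))
--     for _g in _info.get("group", []):
--         _exts += fileTypes["group"][_g]["content"]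
--     _resultMap[_ext] = sorted(_exts)
-- for _cat, _info in fileTypes["group"].items():
--     for _ext in _info["content"]:
--         if _ext in _resultMap:
--             continue  # individual keys and earlier categories take priority
--         _exts = list(_info["content"])
--         _other = _info.get("other", {})
--         _exts += _other.get("individual", [])
--         for _g in _other.get("group", []):
--             _exts += fileTypes["group"][_g]["content"]
--         _resultMap[_ext] = sorted(_exts)
--
-- def getPossibleExtensions(inputExtension: str):
--     return list(_resultMap.get(inputExtension, []))
-- ===== Notes on version B (the rewrite author's own statement) =====
-- stated objective: simpler
-- what changed: A scans the fileTypes structure (individual dict then every group category) on every call; B precomputes a flat extension->answer table once at module load and the function body becomes a single dict lookup returning a fresh copy.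
import Mathlib
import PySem

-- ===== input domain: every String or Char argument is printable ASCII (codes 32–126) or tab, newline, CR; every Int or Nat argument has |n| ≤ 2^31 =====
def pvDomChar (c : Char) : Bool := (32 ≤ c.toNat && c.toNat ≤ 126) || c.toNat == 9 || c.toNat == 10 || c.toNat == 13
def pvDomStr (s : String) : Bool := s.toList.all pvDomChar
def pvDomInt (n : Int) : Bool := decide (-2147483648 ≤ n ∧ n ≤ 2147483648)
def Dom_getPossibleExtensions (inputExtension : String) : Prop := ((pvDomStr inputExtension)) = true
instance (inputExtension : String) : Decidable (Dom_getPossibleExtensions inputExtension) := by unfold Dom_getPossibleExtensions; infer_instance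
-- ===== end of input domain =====

-- B replaces A's per-call branch-and-scan logic by a table of all answers precomputed once
-- at module load, so each call is a single dict lookup (objective: simpler function body; per-call scan replaced by one lookup).

-- Shared module data: the fileTypes constant of src/files.py.
-- "individual"-style sub-dicts: optional "individual" and "group" lists (absence = key missing).
structure IndEntry where
  individual : Option (List String)
  group : Option (List String)
deriving Repr, DecidableEq

structure GroupEntry where
  content : List String
  other : Option IndEntry
deriving Repr, DecidableEq

def fileTypesIndividual : List (String × IndEntry) :=
  [("gif", ⟨none, some ["images", "videos"]⟩),
   ("pdf", ⟨none, some ["images"]⟩)]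

def fileTypesGroup : List (String × GroupEntry) :=
  [("images", ⟨["png", "jpg", "jpeg", "webp", "bmp", "heic"], some ⟨some ["gif", "pdf"], none⟩⟩),
   ("videos", ⟨["mp4", "m4v", "mov", "avi", "wmv", "flv", "webm", "mkv", "3gp", "mpeg", "mpg", "vob"],
               some ⟨some ["gif"], some ["audio"]⟩⟩),
   ("audio", ⟨["mp3", "wav", "aac", "ogg", "m4a", "flac", "alac", "wma", "aiff", "amr", "opus"], none⟩),
   ("fonts", ⟨["otf", "ttf", "woff", "woff2"], none⟩)]

-- fileTypes["group"][g]["content"]; in the module data every referenced group exists,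
-- so the getD [] default is never taken (Python would raise KeyError there).
def groupContent (g : String) : List String :=
  ((fileTypesGroup.lookup g).map GroupEntry.content).getD []

-- ===== PORT A =====
-- the for-category loop with its early returns (sorted(...) keyed by .toList: the same code-point order, kernel-computable)
def goA : List (String × GroupEntry) → String → List String
  | [], _ => PySem.List.sorted ([] : List String) (fun s => s.toList) false
  | (_, e) :: rest, x =>
    if x ∈ e.content then
      let p := ([] : List String) ++ e.content
      let p := match e.other with
        | none => p
        | some o =>
          let p := match o.individual with | some l => p ++ l | none => p
          match o.group with
          | some gs => gs.foldl (fun acc g => acc ++ groupContent g) p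
          | none => p
      PySem.List.sorted p (fun s => s.toList) false
    else goA rest x

def getPossibleExtensions (inputExtension : String) : List String :=
  match fileTypesIndividual.lookup inputExtension with
  | some e =>
    let p : List String := []
    let p := match e.individual with | some l => p ++ l | none => p
    let p := match e.group with
      | some gs => gs.foldl (fun acc g => acc ++ groupContent g) p
      | none => p
    PySem.List.sorted p (fun s => s.toList) false
  | none => goA fileTypesGroup inputExtension

-- ===== PORT B =====
-- the module-load build of _resultMap, then a single lookup per call
def resultMap : PySem.Dict String (List String) :=
  let m := fileTypesIndividual.foldl
    (fun m p =>
      let exts := p.2.individual.getD []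
      let exts := (p.2.group.getD []).foldl (fun acc g => acc ++ groupContent g) exts
      m.insert p.1 (PySem.List.sorted exts (fun s => s.toList) false))
    PySem.Dict.empty
  fileTypesGroup.foldl
    (fun m p =>
      p.2.content.foldl
        (fun m e =>
          if m.contains e then m
          else
            let other := p.2.other.getD ⟨none, none⟩
            let exts := p.2.content ++ other.individual.getD []
            let exts := (other.group.getD []).foldl (fun acc g => acc ++ groupContent g) exts
            m.insert e (PySem.List.sorted exts (fun s => s.toList) false))
        m)
    m

def getPossibleExtensions_alt (inputExtension : String) : List String :=
  resultMap.getD inputExtension []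

-- ===== PRECONDITION & SPEC =====
def Spec_getPossibleExtensions (inputExtension : String) (out : List String) : Prop := out = getPossibleExtensions_alt inputExtension
instance (inputExtension : String) (out : List String) : Decidable (Spec_getPossibleExtensions inputExtension out) := by unfold Spec_getPossibleExtensions; infer_instance

-- ===== CLAIM (what is proved, stated in full; the proofs are below) =====
def Claim_equal_getPossibleExtensions : Prop := ∀ (inputExtension : String), Dom_getPossibleExtensions inputExtension → Spec_getPossibleExtensions inputExtension (getPossibleExtensions inputExtension)

-- ===== LEMMAS AND PROOFS =====

-- every string either program reacts to: the individual keys and all group contents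
def allKeys : List String :=
  ["gif", "pdf",
   "png", "jpg", "jpeg", "webp", "bmp", "heic",
   "mp4", "m4v", "mov", "avi", "wmv", "flv", "webm", "mkv", "3gp", "mpeg", "mpg", "vob",
   "mp3", "wav", "aac", "ogg", "m4a", "flac", "alac", "wma", "aiff", "amr", "opus",
   "otf", "ttf", "woff", "woff2"]

lemma A_of_not_mem (x : String) (hx : x ∉ allKeys) : getPossibleExtensions x = [] := by
  simp only [allKeys, List.mem_cons, List.not_mem_nil, not_or] at hx
  unfold getPossibleExtensions
  rw [show fileTypesIndividual.lookup x = none by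
        simp only [fileTypesIndividual, List.lookup_cons, List.lookup_nil]
        rw [beq_eq_false_iff_ne.mpr hx.1, beq_eq_false_iff_ne.mpr hx.2.1]]
  simp [goA, fileTypesGroup, hx, PySem.List.sorted_eq_nil_iff]

lemma resultMap_keys : resultMap.keys = allKeys := by decide

lemma B_of_not_mem (x : String) (hx : x ∉ allKeys) : getPossibleExtensions_alt x = [] := by
  have h : resultMap.get? x = none := by
    rw [PySem.Dict.get?_eq_none_iff_not_mem_keys, resultMap_keys]; exact hx
  simp [getPossibleExtensions_alt, PySem.Dict.getD_eq_get?_getD, h]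

-- ===== VERDICT (by name: the statement is the Claim_ definition above) =====
theorem getPossibleExtensions_spec : Claim_equal_getPossibleExtensions := by
  intro x _
  unfold Spec_getPossibleExtensions
  by_cases hx : x ∈ allKeys
  · fin_cases hx <;> decide
  · rw [A_of_not_mem x hx, B_of_not_mem x hx]
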